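-- pv_equiv track=rewrite | github.com/Gentyk/Crypto_lab_2 | task4.py | key_xor_word
-- ===== SOURCE A (Python) =====
-- def key_xor_word(s,k):
--     n=len(s)//len(k)
--     j=0
--     s1=""
--     while (j<n):
--         s1+=k
--         j+=1
--     n=len(s)%len(k)
--     j=0
--     while(j<n):
--         s1+=k[j]
--         j+=1
--     return s1
-- ===== SOURCE B (Python) =====
-- def key_xor_word(s, k):
--     return k * (len(s) // len(k)) + k[:len(s) % len(k)]
-- ===== Notes on version B (the rewrite author's own statement) =====
-- stated objective: idiomatic
-- what changed: Replaces the two while-loops that append the key piecewise with a single closed-form expression: string multiplication for the full repetitions plus a prefix slice for the remainder.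
import Mathlib
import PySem

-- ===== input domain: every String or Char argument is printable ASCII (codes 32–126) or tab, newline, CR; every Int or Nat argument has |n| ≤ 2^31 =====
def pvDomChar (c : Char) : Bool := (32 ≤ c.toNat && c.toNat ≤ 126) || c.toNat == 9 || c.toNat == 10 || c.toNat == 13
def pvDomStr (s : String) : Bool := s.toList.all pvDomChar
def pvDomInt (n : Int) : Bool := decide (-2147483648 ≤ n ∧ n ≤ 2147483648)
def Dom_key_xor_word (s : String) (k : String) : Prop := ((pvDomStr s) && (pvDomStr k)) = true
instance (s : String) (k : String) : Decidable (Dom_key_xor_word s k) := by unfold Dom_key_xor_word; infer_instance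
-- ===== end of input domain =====

-- B replaces the two append-loops with the closed form k * (len(s)//len(k)) + k[:len(s)%len(k)] (idiomatic, no loops).

-- ===== PORT A =====
-- literal transliteration: two while-loops appending to an accumulator string (as List Char)
def key_xor_word (s : String) (k : String) : String :=
  let n := PySem.Int.floordiv (PySem.Str.len s) (PySem.Str.len k)
  -- while j < n: s1 += k
  let s1 := (PySem.List.pyRange 0 n 1).foldl (fun acc _ => acc ++ k.toList) []
  let m := PySem.Int.mod (PySem.Str.len s) (PySem.Str.len k)
  -- while j < m: s1 += k[j]  (j always in range, so the IndexError case cannot occur; pyGetD is exact here)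
  let s2 := (PySem.List.pyRange 0 m 1).foldl (fun acc j => acc ++ [PySem.List.pyGetD k.toList j ' ']) s1
  String.ofList s2

-- ===== PORT B =====
def key_xor_word_alt (s : String) (k : String) : String :=
  let q := PySem.Int.floordiv (PySem.Str.len s) (PySem.Str.len k)
  let r := PySem.Int.mod (PySem.Str.len s) (PySem.Str.len k)
  String.ofList ((List.replicate q.toNat k.toList).flatten ++ PySem.List.slice k.toList none (some r))

-- ===== PRECONDITION & SPEC =====
-- Pre_ excludes k = "" , on which both A and B raise ZeroDivisionError (len(s) // len(k)).
def Pre_key_xor_word (s : String) (k : String) : Prop := k.toList ≠ []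
instance (s : String) (k : String) : Decidable (Pre_key_xor_word s k) := by unfold Pre_key_xor_word; infer_instance
def pvWitness_key_xor_word : String × String := ("hello", "ab")

def Spec_key_xor_word (s : String) (k : String) (out : String) : Prop := out = key_xor_word_alt s k
instance (s : String) (k : String) (out : String) : Decidable (Spec_key_xor_word s k out) := by unfold Spec_key_xor_word; infer_instance

-- ===== CLAIM (what is proved, stated in full; the proofs are below) =====
def Claim_equal_key_xor_word : Prop := ∀ (s : String) (k : String), Dom_key_xor_word s k → Pre_key_xor_word s k → Spec_key_xor_word s k (key_xor_word s k)

-- ===== LEMMAS AND PROOFS =====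

-- first loop: appending K a Nat number of times is flatten (replicate N K)
theorem foldl_append_const (K init : List Char) (N : Nat) :
    (PySem.List.pyRange 0 (N : Int) 1).foldl (fun acc _ => acc ++ K) init
      = init ++ (List.replicate N K).flatten := by
  induction N generalizing init with
  | zero => simp [PySem.List.pyRange_one_eq_nil]
  | succ n ih =>
      have : ((n : Int) + 1) = ((n + 1 : Nat) : Int) := by push_cast; ring
      rw [← this, PySem.List.pyRange_one_succ_right (by positivity)]
      simp [List.foldl_append, ih, List.replicate_succ']

-- second loop: collecting K[0..M) is take M
theorem map_pyGetD_range_take (K : List Char) (d : Char) (M : Nat) (h : M ≤ K.length) :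
    (PySem.List.pyRange 0 (M : Int) 1).map (fun j => PySem.List.pyGetD K j d) = K.take M := by
  induction M with
  | zero => simp [PySem.List.pyRange_one_eq_nil]
  | succ n ih =>
      have hc : ((n : Int) + 1) = ((n + 1 : Nat) : Int) := by push_cast; ring
      rw [← hc, PySem.List.pyRange_one_succ_right (by positivity)]
      have hn : n < K.length := by omega
      rw [List.map_append, ih (by omega), List.map_singleton,
        PySem.List.pyGetD_natCast, List.getD_eq_getElem K d hn,
        List.take_add_one, List.getElem?_eq_getElem hn]
      rfl

-- ===== VERDICT (by name: the statement is the Claim_ definition above) =====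
theorem key_xor_word_spec : Claim_equal_key_xor_word := by
  intro s k _ hk
  unfold Spec_key_xor_word key_xor_word key_xor_word_alt
  have hkpos : 0 < k.toList.length := List.length_pos_iff.mpr hk
  simp only [PySem.Str.len_eq]
  rw [show ((s.toList.length : Int)) = ((s.toList.length : Nat) : Int) from rfl]
  rw [PySem.Int.floordiv_natCast, PySem.Int.mod_natCast]
  congr 1
  rw [foldl_append_const, Int.toNat_natCast,
      PySem.List.foldl_append_singleton_eq_map,
      map_pyGetD_range_take k.toList ' ' _ (Nat.le_of_lt (Nat.mod_lt _ hkpos)),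
      PySem.List.slice_to _ (by positivity), Int.toNat_natCast, List.append_assoc, List.nil_append]
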